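-- pv_equiv track=rewrite | github.com/ShovalShabi/Python | Generators, Lambda Expressions and List comprehensions/Question6.py | check_div_more_than_num
-- ===== SOURCE A (Python) =====
-- def check_div_more_than_num(num):
--     sum=0
--     for i in range(1,num):
--         if num%i==0:
--            sum+=i
--     if sum>num:
--         return True
--     return False
-- ===== SOURCE B (Python) =====
-- def check_div_more_than_num(num):
--     s = 0
--     if num > 1:
--         s = 1
--         i = 2
--         while i * i <= num:
--             if num % i == 0:
--                 s += i
--                 q = num // i
--                 if q != i:
--                     s += q
--             i += 1
--     return s > num
-- ===== Notes on version B (the rewrite author's own statement) =====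
-- stated objective: faster
-- what changed: Replaces the O(n) scan of all i in range(1,num) with an O(sqrt(n)) loop that adds each divisor pair (i, num//i) for i up to sqrt(num).
import Mathlib
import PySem

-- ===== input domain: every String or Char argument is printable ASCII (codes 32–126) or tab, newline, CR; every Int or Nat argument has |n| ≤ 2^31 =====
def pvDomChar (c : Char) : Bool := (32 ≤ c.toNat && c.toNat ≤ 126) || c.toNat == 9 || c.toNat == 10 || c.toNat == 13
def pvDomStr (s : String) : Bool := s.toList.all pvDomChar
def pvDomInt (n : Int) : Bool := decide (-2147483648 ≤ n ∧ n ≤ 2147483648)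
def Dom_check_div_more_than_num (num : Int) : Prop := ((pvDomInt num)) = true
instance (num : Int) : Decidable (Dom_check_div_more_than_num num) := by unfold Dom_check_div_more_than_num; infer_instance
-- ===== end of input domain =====

-- B replaces A's O(n) scan of range(1, num) with an O(sqrt(num)) loop adding divisor pairs (i, num // i).

-- ===== PORT A =====
def check_div_more_than_num (num : Int) : Bool :=
  let sum := (PySem.List.pyRange 1 num 1).foldl
    (fun s i => if PySem.Int.mod num i == 0 then s + i else s) 0
  if sum > num then true else false

-- ===== PORT B =====
-- the `while i * i <= num` loop of Source B, carrying the running sum s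
def pvAltLoop (num i s : Int) : Int :=
  if h : i * i ≤ num then
    let s' :=
      if PySem.Int.mod num i == 0 then
        let q := PySem.Int.floordiv num i
        if q ≠ i then s + i + q else s + i
      else s
    pvAltLoop num (i + 1) s'
  else s
termination_by (num + 1 - i).toNat
decreasing_by
  have h0 : 0 ≤ num := le_trans (mul_self_nonneg i) h
  have hile : i ≤ num := by
    rcases le_or_gt i 0 with hi | hi
    · omega
    · nlinarith
  omega

def check_div_more_than_num_alt (num : Int) : Bool :=
  let s : Int := 0
  let s : Int := if num > 1 then pvAltLoop num 2 1 else s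
  decide (s > num)

-- ===== PRECONDITION & SPEC =====
def Spec_check_div_more_than_num (num : Int) (out : Bool) : Prop := out = check_div_more_than_num_alt num
instance (num : Int) (out : Bool) : Decidable (Spec_check_div_more_than_num num out) := by unfold Spec_check_div_more_than_num; infer_instance

-- ===== CLAIM (what is proved, stated in full; the proofs are below) =====
def Claim_equal_check_div_more_than_num : Prop := ∀ (num : Int), Dom_check_div_more_than_num num → Spec_check_div_more_than_num num (check_div_more_than_num num)

-- ===== LEMMAS AND PROOFS =====

-- A's loop as a Finset sum over Ico 1 (m+1)
theorem pvAfold (n : ℕ) (m : ℕ) :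
    (PySem.List.pyRange 1 (1 + (m : Int)) 1).foldl
      (fun s i => if PySem.Int.mod (n : Int) i == 0 then s + i else s) 0
    = ((∑ d ∈ Finset.Ico 1 (m + 1), if n % d = 0 then d else 0 : ℕ) : Int) := by
  induction m with
  | zero =>
      rw [PySem.List.pyRange_one_eq_nil (by omega : (1:Int) + (0:ℕ) ≤ 1)]
      simp
  | succ m ih =>
      have hsplit : PySem.List.pyRange 1 (1 + ((m:Int) + 1)) 1
          = PySem.List.pyRange 1 (1 + (m:Int)) 1 ++ [1 + (m:Int)] := by
        have := PySem.List.pyRange_one_succ_right (a := 1) (b := 1 + (m:Int)) (by omega)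
        simpa [add_assoc] using this
      push_cast
      rw [hsplit, List.foldl_append]
      push_cast at ih
      rw [ih]
      rw [Finset.sum_Ico_succ_top (by omega : 1 ≤ m + 1)]
      simp only [List.foldl_cons, List.foldl_nil]
      have hm : (1 + (m:Int)) = ((m + 1 : ℕ) : Int) := by push_cast; ring
      rw [hm, PySem.Int.mod_natCast]
      by_cases hd : n % (m + 1) = 0
      · simp [hd]
      · have hb : ((((n % (m + 1) : ℕ)) : Int) == 0) = false :=
          beq_eq_false_iff_ne.mpr (Nat.cast_ne_zero.mpr hd)
        rw [hb]
        simp [hd]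

-- B's loop as a Finset sum over Ico i (sqrt n + 1)
theorem pvBloop (n : ℕ) (i : ℕ) (hi : 1 ≤ i) (s : Int) :
    pvAltLoop (n : Int) (i : Int) s
    = s + ((∑ j ∈ Finset.Ico i (Nat.sqrt n + 1),
        if n % j = 0 then (j + if n / j ≠ j then n / j else 0) else 0 : ℕ) : Int) := by
  by_cases hle : i ≤ Nat.sqrt n
  · have hguard : (i : Int) * (i : Int) ≤ (n : Int) := by
      exact_mod_cast Nat.le_sqrt.mp hle
    rw [pvAltLoop, dif_pos hguard]
    have hrec : ∀ s' : Int, pvAltLoop (n : Int) ((i : Int) + 1) s'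
        = s' + ((∑ j ∈ Finset.Ico (i + 1) (Nat.sqrt n + 1),
            if n % j = 0 then (j + if n / j ≠ j then n / j else 0) else 0 : ℕ) : Int) := by
      intro s'
      have h := pvBloop n (i + 1) (by omega) s'
      rw [Nat.cast_add, Nat.cast_one] at h
      exact h
    rw [Finset.sum_eq_sum_Ico_succ_bot (by omega : i < Nat.sqrt n + 1)]
    simp only [PySem.Int.mod_natCast, PySem.Int.floordiv_natCast]
    by_cases hd : n % i = 0
    · by_cases hne : n / i = i
      · simp only [hd, Nat.cast_zero, beq_self_eq_true, if_true, hne, ne_eq,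
          not_true_eq_false, if_false, hrec]
        simp
        ring
      · have hqne : ((n / i : ℕ) : Int) ≠ (i : Int) := by exact_mod_cast hne
        simp only [hd, Nat.cast_zero, beq_self_eq_true, if_true, ne_eq, hqne,
          not_false_eq_true, if_true, hrec]
        simp [hne]
        ring
    · have hb : ((((n % i : ℕ)) : Int) == 0) = false :=
        beq_eq_false_iff_ne.mpr (Nat.cast_ne_zero.mpr hd)
      simp only [hb, Bool.false_eq_true, if_false, hrec]
      simp [hd]
  · have hguard : ¬ ((i : Int) * (i : Int) ≤ (n : Int)) := by
      have hlt : n < i * i := by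
        have := Nat.sqrt_lt'.mp (by omega : Nat.sqrt n < i)
        simpa [pow_two] using this
      push Not
      exact_mod_cast hlt
    rw [pvAltLoop, dif_neg hguard]
    rw [Finset.Ico_eq_empty (by omega)]
    simp
termination_by Nat.sqrt n + 1 - i
decreasing_by omega

-- the pairing: high divisors d (sqrt n < d < n) are exactly the values n / j for
-- low divisors j in [2, sqrt n] with n / j different from j
theorem pvPairing (n : ℕ) (hn : 2 ≤ n) :
    (∑ d ∈ Finset.Ico (Nat.sqrt n + 1) n, if n % d = 0 then d else 0)
    = ∑ j ∈ Finset.Ico 2 (Nat.sqrt n + 1),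
        if n % j = 0 ∧ n / j ≠ j then n / j else 0 := by
  have hn0 : n ≠ 0 := by omega
  rw [← Finset.sum_filter, ← Finset.sum_filter]
  refine Finset.sum_nbij' (fun d => n / d) (fun j => n / j) ?_ ?_ ?_ ?_ ?_
  · intro d hd
    simp only [Finset.mem_filter, Finset.mem_Ico] at hd ⊢
    obtain ⟨⟨hd1, hd2⟩, hd3⟩ := hd
    have hdvd : d ∣ n := Nat.dvd_of_mod_eq_zero hd3
    have hdpos : 0 < d := by omega
    have hmul : d * (n / d) = n := Nat.mul_div_cancel' hdvd
    have hq1 : 1 ≤ n / d := (Nat.one_le_div_iff hdpos).mpr (by omega)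
    have hqne1 : n / d ≠ 1 := by
      intro h1; rw [h1] at hmul; omega
    have hnd : n < d * d := by
      have := Nat.sqrt_lt'.mp (by omega : Nat.sqrt n < d)
      simpa [pow_two] using this
    have hqlt : n / d < d := by
      by_contra hge
      push Not at hge
      nlinarith
    have hqsqrt : n / d ≤ Nat.sqrt n := by
      rw [Nat.le_sqrt]
      calc n / d * (n / d) ≤ n / d * d := Nat.mul_le_mul_left _ (le_of_lt hqlt)
        _ = n := by rw [Nat.mul_comm] at hmul; exact hmul
    refine ⟨⟨by omega, by omega⟩, ?_, ?_⟩
    · exact Nat.mod_eq_zero_of_dvd (Nat.div_dvd_of_dvd hdvd)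
    · rw [Nat.div_div_self hdvd hn0]; omega
  · intro j hj
    simp only [Finset.mem_filter, Finset.mem_Ico] at hj ⊢
    obtain ⟨⟨hj1, hj2⟩, hj3, hj4⟩ := hj
    have hdvd : j ∣ n := Nat.dvd_of_mod_eq_zero hj3
    have hmul : j * (n / j) = n := Nat.mul_div_cancel' hdvd
    have hjj : j * j ≤ n := Nat.le_sqrt.mp (by omega)
    have hsq : Nat.sqrt n * Nat.sqrt n ≤ n := Nat.sqrt_le n
    have hlow : Nat.sqrt n < n / j := by
      by_contra hge
      push Not at hge
      have h1 : n ≤ Nat.sqrt n * Nat.sqrt n := by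
        calc n = j * (n / j) := hmul.symm
          _ ≤ Nat.sqrt n * Nat.sqrt n := Nat.mul_le_mul (by omega) hge
      have he1 : j = Nat.sqrt n := by nlinarith
      have he2 : n / j = Nat.sqrt n := by nlinarith
      exact hj4 (by omega)
    refine ⟨⟨by omega, Nat.div_lt_self (by omega) (by omega)⟩, ?_⟩
    exact Nat.mod_eq_zero_of_dvd (Nat.div_dvd_of_dvd hdvd)
  · intro d hd
    simp only [Finset.mem_filter, Finset.mem_Ico] at hd
    exact Nat.div_div_self (Nat.dvd_of_mod_eq_zero hd.2) hn0
  · intro j hj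
    simp only [Finset.mem_filter, Finset.mem_Ico] at hj
    exact Nat.div_div_self (Nat.dvd_of_mod_eq_zero hj.2.1) hn0
  · intro d hd
    simp only [Finset.mem_filter, Finset.mem_Ico] at hd
    exact (Nat.div_div_self (Nat.dvd_of_mod_eq_zero hd.2) hn0).symm

-- A's divisor sum over [1, n) equals 1 plus B's paired sum over [2, sqrt n]
theorem pvSumEq (n : ℕ) (hn : 2 ≤ n) :
    (∑ d ∈ Finset.Ico 1 n, if n % d = 0 then d else 0)
    = 1 + ∑ j ∈ Finset.Ico 2 (Nat.sqrt n + 1),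
        if n % j = 0 then (j + if n / j ≠ j then n / j else 0) else 0 := by
  have hr1 : 1 ≤ Nat.sqrt n := Nat.le_sqrt.mpr (by omega : 1 * 1 ≤ n)
  have hrn : Nat.sqrt n < n := Nat.sqrt_lt_self (by omega)
  rw [Finset.sum_eq_sum_Ico_succ_bot (by omega : 1 < n)]
  rw [← Finset.sum_Ico_consecutive _ (by omega : 2 ≤ Nat.sqrt n + 1) (by omega : Nat.sqrt n + 1 ≤ n)]
  rw [pvPairing n hn]
  simp only [Nat.mod_one]
  rw [← Finset.sum_add_distrib]
  congr 1
  apply Finset.sum_congr rfl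
  intro j _
  by_cases hd : n % j = 0 <;> by_cases hne : n / j = j <;> simp [hd, hne]

-- ===== VERDICT (by name: the statement is the Claim_ definition above) =====
theorem check_div_more_than_num_spec : Claim_equal_check_div_more_than_num := by
  intro num _
  unfold Spec_check_div_more_than_num
  simp only [check_div_more_than_num, check_div_more_than_num_alt]
  by_cases h2 : num > 1
  · obtain ⟨n, rfl⟩ : ∃ n : ℕ, num = (n : Int) :=
      ⟨num.toNat, (Int.toNat_of_nonneg (by omega)).symm⟩
    have hn : 2 ≤ n := by exact_mod_cast h2
    have hA : (1 : Int) + ((n - 1 : ℕ) : Int) = (n : Int) := by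
      push_cast [Nat.cast_sub (by omega : 1 ≤ n)]; ring
    have hAfold := pvAfold n (n - 1)
    rw [hA, (by omega : n - 1 + 1 = n)] at hAfold
    have hBloop := pvBloop n 2 (by omega) 1
    rw [(by norm_num : ((2:ℕ) : Int) = 2)] at hBloop
    rw [if_pos h2, hAfold, hBloop, pvSumEq n hn]
    simp
  · rw [PySem.List.pyRange_one_eq_nil (by omega : num ≤ 1), if_neg h2]
    simp
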